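-- pv_equiv track=rewrite | github.com/bgoonz/Data-Structures-Algos-Codebase | Google-FooBar-master/foobar4_cheat.py | maxprodnon0
-- ===== SOURCE A (Python) =====
-- def prod(seq, a, b):
--     r = 1
--     for i in range(a, b):
--         r *= seq[i]
--     return r
--
-- def maxprodnon0(seq, a, b):
--     firstneg = -1
--     negs = 0
--     for i in range(a, b):
--         if seq[i] >= 0: continue
--         negs += 1
--         if firstneg < 0:
--             firstneg = i
--         lastneg = i
--     if negs % 2 == 0: return prod(seq, a, b)
--     return max(prod(seq, firstneg + 1, b), prod(seq, a, lastneg))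
-- ===== SOURCE B (Python) =====
-- def maxprodnon0(seq, a, b):
--     # Single fused pass: running product with snapshots instead of re-scanning subranges.
--     prefix = 1       # product of seq[a:i]
--     negs = 0
--     seen_neg = False
--     after_first = 1  # product of elements strictly after the first negative
--     before_last = 1  # product of seq[a:lastneg]
--     for i in range(a, b):
--         x = seq[i]
--         if x < 0:
--             negs += 1
--             before_last = prefix
--         prefix *= x
--         if seen_neg:
--             after_first *= x
--         if x < 0:
--             seen_neg = True
--     if negs % 2 == 0:
--         return prefix
--     return max(after_first, before_last)
-- ===== Notes on version B (the rewrite author's own statement) =====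
-- stated objective: alternative
-- what changed: A counts negatives in one loop and then re-scans the range up to three more times via prod(); B is a single fused left-to-right pass maintaining a running prefix product with snapshots (before_last_neg, after_first_neg) so no subrange is ever re-scanned.
-- outside the precondition, e.g. on maxprodnon0([-2, 3, -1, 4, 1], -3, 4): A returns 24, B returns 96
import Mathlib
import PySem

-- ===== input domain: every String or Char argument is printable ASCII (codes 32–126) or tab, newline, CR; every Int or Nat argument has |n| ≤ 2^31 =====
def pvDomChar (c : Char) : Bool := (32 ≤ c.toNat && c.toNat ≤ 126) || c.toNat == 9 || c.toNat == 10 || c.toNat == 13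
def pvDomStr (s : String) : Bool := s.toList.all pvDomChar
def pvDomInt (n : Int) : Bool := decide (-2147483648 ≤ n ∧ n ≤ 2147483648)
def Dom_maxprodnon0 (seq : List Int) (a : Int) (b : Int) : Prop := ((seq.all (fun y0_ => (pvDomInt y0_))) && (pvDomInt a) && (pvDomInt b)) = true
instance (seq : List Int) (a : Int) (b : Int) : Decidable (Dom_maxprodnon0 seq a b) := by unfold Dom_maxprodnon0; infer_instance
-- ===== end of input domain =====

-- B fuses A's counting loop and its three prod() re-scans into one left-to-right pass
-- that maintains running-product snapshots (objective: alternative single-pass decomposition).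


-- ===== PORT A =====
-- helper prod(seq, a, b); seq[i] is in range under Pre_ (pyGetD's default is never read there)
def prodA (seq : List Int) (a : Int) (b : Int) : Int :=
  (PySem.List.pyRange a b 1).foldl (fun r i => r * PySem.List.pyGetD seq i 0) 1

-- loop body of A; state = (firstneg, negs, lastneg); lastneg starts at 0 (unbound in Python,
-- read only when negs is odd, hence after it was assigned)
def stepA (seq : List Int) (st : Int × Int × Int) (i : Int) : Int × Int × Int :=
  if PySem.List.pyGetD seq i 0 ≥ 0 then st
  else ((if st.1 < 0 then i else st.1), st.2.1 + 1, i)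

def maxprodnon0 (seq : List Int) (a : Int) (b : Int) : Int :=
  let st := (PySem.List.pyRange a b 1).foldl (stepA seq) (-1, 0, 0)
  if PySem.Int.mod st.2.1 2 = 0 then prodA seq a b
  else max (prodA seq (st.1 + 1) b) (prodA seq a st.2.2)

-- ===== PORT B =====
-- loop body of B; state = (prefix, negs, seen_neg, after_first, before_last)
def stepB (seq : List Int) (st : Int × Int × Bool × Int × Int) (i : Int) :
    Int × Int × Bool × Int × Int :=
  let x := PySem.List.pyGetD seq i 0
  ((st.1 * x),
   (if x < 0 then st.2.1 + 1 else st.2.1),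
   (if x < 0 then true else st.2.2.1),
   (if st.2.2.1 then st.2.2.2.1 * x else st.2.2.2.1),
   (if x < 0 then st.1 else st.2.2.2.2))

def maxprodnon0_alt (seq : List Int) (a : Int) (b : Int) : Int :=
  let st := (PySem.List.pyRange a b 1).foldl (stepB seq) (1, 0, false, 1, 1)
  if PySem.Int.mod st.2.1 2 = 0 then st.1
  else max st.2.2.2.1 st.2.2.2.2

-- ===== PRECONDITION & SPEC =====
-- Pre_ excludes the out-of-range windows on which A raises IndexError, and the in-bounds
-- negative-index-wraparound windows that contain a negative ELEMENT at a negative index: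
-- there A's 'firstneg < 0' sentinel test collides with the genuine negative index, so which
-- element A treats as the first negative is an accident of its implementation (the two still
-- coincide in value on many such windows).
def Pre_maxprodnon0 (seq : List Int) (a : Int) (b : Int) : Prop :=
  b ≤ a ∨ (-(seq.length : Int) ≤ a ∧ b ≤ (seq.length : Int) ∧
    ∀ i ∈ PySem.List.pyRange a b 1, i < 0 → 0 ≤ PySem.List.pyGetD seq i 0)
instance (seq : List Int) (a : Int) (b : Int) : Decidable (Pre_maxprodnon0 seq a b) := by
  unfold Pre_maxprodnon0; infer_instance

def pvWitness_maxprodnon0 : List Int × Int × Int := ([2, -3, 4, -1, 0], 0, 5)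

def Spec_maxprodnon0 (seq : List Int) (a : Int) (b : Int) (out : Int) : Prop := out = maxprodnon0_alt seq a b
instance (seq : List Int) (a : Int) (b : Int) (out : Int) : Decidable (Spec_maxprodnon0 seq a b out) := by unfold Spec_maxprodnon0; infer_instance

-- ===== CLAIM (what is proved, stated in full; the proofs are below) =====
def Claim_equal_maxprodnon0 : Prop := ∀ (seq : List Int) (a : Int) (b : Int), Dom_maxprodnon0 seq a b → Pre_maxprodnon0 seq a b → Spec_maxprodnon0 seq a b (maxprodnon0 seq a b)

-- ===== LEMMAS AND PROOFS =====

lemma prodA_nil (seq : List Int) (a b : Int) (h : b ≤ a) : prodA seq a b = 1 := by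
  unfold prodA; rw [PySem.List.pyRange_one_eq_nil h]; rfl

lemma prodA_succ (seq : List Int) (u a : Int) (h : u ≤ a) :
    prodA seq u (a + 1) = prodA seq u a * PySem.List.pyGetD seq a 0 := by
  unfold prodA
  rw [PySem.List.pyRange_one_succ_right h, List.foldl_append]
  rfl

-- the invariant linking A's loop state (firstneg, negs, lastneg) after processing
-- indices [a0, a) to B's state (prefix, negs, seen_neg, after_first, before_last)
def LoopInv (seq : List Int) (a0 a : Int) (stA : Int × Int × Int)
    (stB : Int × Int × Bool × Int × Int) : Prop :=
  stB.2.1 = stA.2.1 ∧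
  stB.1 = prodA seq a0 a ∧
  ((stA.2.1 = 0 ∧ stA.1 = -1 ∧ stB.2.2.1 = false ∧ stB.2.2.2.1 = 1 ∧ stB.2.2.2.2 = 1) ∨
   (0 < stA.2.1 ∧ stB.2.2.1 = true ∧ 0 ≤ stA.1 ∧ stA.1 < a ∧ a0 ≤ stA.2.2 ∧ stA.2.2 < a ∧
    stB.2.2.2.1 = prodA seq (stA.1 + 1) a ∧ stB.2.2.2.2 = prodA seq a0 stA.2.2))

lemma LoopInv_step (seq : List Int) (a0 a : Int)
    (hOK : PySem.List.pyGetD seq a 0 < 0 → 0 ≤ a) (ha : a0 ≤ a)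
    (stA : Int × Int × Int) (stB : Int × Int × Bool × Int × Int)
    (hI : LoopInv seq a0 a stA stB) :
    LoopInv seq a0 (a + 1) (stepA seq stA a) (stepB seq stB a) := by
  obtain ⟨hng, hpr, hrest⟩ := hI
  set x := PySem.List.pyGetD seq a 0 with hx
  have hBpr : (stepB seq stB a).1 = stB.1 * x := rfl
  have hBng : (stepB seq stB a).2.1 = if x < 0 then stB.2.1 + 1 else stB.2.1 := rfl
  have hBsn : (stepB seq stB a).2.2.1 = if x < 0 then true else stB.2.2.1 := rfl
  have hBaf : (stepB seq stB a).2.2.2.1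
      = if stB.2.2.1 then stB.2.2.2.1 * x else stB.2.2.2.1 := rfl
  have hBbf : (stepB seq stB a).2.2.2.2 = if x < 0 then stB.1 else stB.2.2.2.2 := rfl
  by_cases hneg : x < 0
  · -- negative element
    have hxge : ¬ (x ≥ 0) := by omega
    have hA : stepA seq stA a = ((if stA.1 < 0 then a else stA.1), stA.2.1 + 1, a) := by
      unfold stepA; rw [← hx, if_neg hxge]
    rcases hrest with ⟨h1, h2, h3, h4, h5⟩ | ⟨h1, h2, h3, h4, h5, h6, h7, h8⟩
    · -- first negative ever
      have ha0' : 0 ≤ a := hOK (hx ▸ hneg)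
      have hA' : stepA seq stA a = (a, stA.2.1 + 1, a) := by
        rw [hA, if_pos (by omega : stA.1 < 0)]
      refine ⟨?_, ?_, Or.inr ⟨?_, ?_, ?_, ?_, ?_, ?_, ?_, ?_⟩⟩
      · rw [hBng, if_pos hneg, hA', hng]
      · rw [hBpr, hpr, prodA_succ seq a0 a ha, ← hx]
      · rw [hA']; dsimp only; omega
      · rw [hBsn, if_pos hneg]
      · rw [hA']; dsimp only; omega
      · rw [hA']; dsimp only; omega
      · rw [hA']; dsimp only; omega
      · rw [hA']; dsimp only; omega
      · rw [hBaf, h3, if_neg Bool.false_ne_true, h4, hA']; dsimp only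
        exact (prodA_nil seq (a + 1) (a + 1) le_rfl).symm
      · rw [hBbf, if_pos hneg, hpr, hA']
    · -- later negative: firstneg keeps its value
      have hA' : stepA seq stA a = (stA.1, stA.2.1 + 1, a) := by
        rw [hA, if_neg (by omega : ¬ stA.1 < 0)]
      refine ⟨?_, ?_, Or.inr ⟨?_, ?_, ?_, ?_, ?_, ?_, ?_, ?_⟩⟩
      · rw [hBng, if_pos hneg, hA', hng]
      · rw [hBpr, hpr, prodA_succ seq a0 a ha, ← hx]
      · rw [hA']; dsimp only; omega
      · rw [hBsn, if_pos hneg]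
      · rw [hA']; dsimp only; omega
      · rw [hA']; dsimp only; omega
      · rw [hA']; dsimp only; omega
      · rw [hA']; dsimp only; omega
      · rw [hBaf, h2, if_pos rfl, h7, hA']; dsimp only
        rw [prodA_succ seq (stA.1 + 1) a (by omega), ← hx]
      · rw [hBbf, if_pos hneg, hpr, hA']
  · -- nonnegative element: A's state unchanged
    have hA : stepA seq stA a = stA := by
      unfold stepA; rw [← hx, if_pos (by omega : x ≥ 0)]
    rw [hA]
    rcases hrest with ⟨h1, h2, h3, h4, h5⟩ | ⟨h1, h2, h3, h4, h5, h6, h7, h8⟩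
    · refine ⟨?_, ?_, Or.inl ⟨h1, h2, ?_, ?_, ?_⟩⟩
      · rw [hBng, if_neg hneg]; exact hng
      · rw [hBpr, hpr, prodA_succ seq a0 a ha, ← hx]
      · rw [hBsn, if_neg hneg]; exact h3
      · rw [hBaf, h3, if_neg Bool.false_ne_true]; exact h4
      · rw [hBbf, if_neg hneg]; exact h5
    · refine ⟨?_, ?_, Or.inr ⟨h1, ?_, h3, by omega, h5, by omega, ?_, ?_⟩⟩
      · rw [hBng, if_neg hneg]; exact hng
      · rw [hBpr, hpr, prodA_succ seq a0 a ha, ← hx]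
      · rw [hBsn, if_neg hneg]; exact h2
      · rw [hBaf, h2, if_pos rfl, h7, prodA_succ seq (stA.1 + 1) a (by omega), ← hx]
      · rw [hBbf, if_neg hneg]; exact h8

lemma LoopInv_fold (seq : List Int) (a0 : Int) :
    ∀ (n : Nat) (a b : Int), (∀ i ∈ PySem.List.pyRange a b 1, i < 0 → 0 ≤ PySem.List.pyGetD seq i 0) →
    a0 ≤ a → b = a + n →
    ∀ (stA : Int × Int × Int) (stB : Int × Int × Bool × Int × Int),
    LoopInv seq a0 a stA stB →
    LoopInv seq a0 b ((PySem.List.pyRange a b 1).foldl (stepA seq) stA)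
      ((PySem.List.pyRange a b 1).foldl (stepB seq) stB) := by
  intro n
  induction n with
  | zero =>
    intro a b _ ha hb stA stB hI
    have hba : b ≤ a := by omega
    rw [PySem.List.pyRange_one_eq_nil hba]
    simpa [show b = a by omega] using hI
  | succ m ih =>
    intro a b hOK ha hb stA stB hI
    have hab : a < b := by omega
    have hmem : a ∈ PySem.List.pyRange a b 1 := PySem.List.mem_pyRange_one.mpr ⟨le_rfl, hab⟩
    rw [PySem.List.pyRange_one_cons hab]
    simp only [List.foldl_cons]
    refine ih (a + 1) b (fun i hi => hOK i ?_) (by omega) (by omega) _ _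
      (LoopInv_step seq a0 a
        (fun hxneg => by by_contra hna; exact absurd (hOK a hmem (by omega)) (by omega))
        ha stA stB hI)
    have := PySem.List.mem_pyRange_one.mp hi
    exact PySem.List.mem_pyRange_one.mpr ⟨by omega, this.2⟩

-- ===== VERDICT (by name: the statement is the Claim_ definition above) =====
theorem maxprodnon0_spec : Claim_equal_maxprodnon0 := by
  intro seq a b _ hpre
  unfold Spec_maxprodnon0
  by_cases hba : b ≤ a
  · simp [maxprodnon0, maxprodnon0_alt, PySem.List.pyRange_one_eq_nil hba,
      prodA_nil seq a b hba, PySem.Int.mod]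
  · obtain ⟨_, _, hOK⟩ : -(seq.length : Int) ≤ a ∧ b ≤ (seq.length : Int) ∧
        ∀ i ∈ PySem.List.pyRange a b 1, i < 0 → 0 ≤ PySem.List.pyGetD seq i 0 := by
      rcases hpre with h | h
      · omega
      · exact h
    have hinit : LoopInv seq a a (-1, 0, 0) (1, 0, false, 1, 1) :=
      ⟨rfl, (prodA_nil seq a a le_rfl).symm, Or.inl ⟨rfl, rfl, rfl, rfl, rfl⟩⟩
    have hfin := LoopInv_fold seq a (b - a).toNat a b hOK le_rfl (by omega)
      (-1, 0, 0) (1, 0, false, 1, 1) hinit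
    obtain ⟨hng, hpr, hrest⟩ := hfin
    set SA := (PySem.List.pyRange a b 1).foldl (stepA seq) (-1, 0, 0) with hSA
    set SB := (PySem.List.pyRange a b 1).foldl (stepB seq) (1, 0, false, 1, 1) with hSB
    show (if PySem.Int.mod SA.2.1 2 = 0 then prodA seq a b
          else max (prodA seq (SA.1 + 1) b) (prodA seq a SA.2.2))
        = (if PySem.Int.mod SB.2.1 2 = 0 then SB.1 else max SB.2.2.2.1 SB.2.2.2.2)
    rw [hng]
    by_cases hmod : PySem.Int.mod SA.2.1 2 = 0
    · rw [if_pos hmod, if_pos hmod, hpr]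
    · rw [if_neg hmod, if_neg hmod]
      rcases hrest with ⟨h1, _⟩ | ⟨_, _, _, _, _, _, h7, h8⟩
      · exact absurd (by rw [h1]; decide) hmod
      · rw [h7, h8]
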